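-- pv_equiv track=rewrite | github.com/imnotneon-dev/CSINTSY-mcos | dump/trainer2.py | check_if_filipino_bigrams
-- ===== SOURCE A (Python) =====
-- from typing import List, Tuple, Optional
--
-- FIL_BIGRAM_CLUES = {
--     'ng', 'mg'  # you can add more if needed
-- }
--
-- def check_if_filipino_bigrams(word: str) -> Optional[str]:
--     if not word or len(word) < 2:
--         return None
--     w = word.lower()
--     for bg in FIL_BIGRAM_CLUES:
--         if bg in w:
--             return 'FIL'
--     return None
-- ===== SOURCE B (Python) =====
-- from typing import Optional
--
-- FIL_BIGRAM_CLUES = {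
--     'ng', 'mg'  # you can add more if needed
-- }
--
-- def check_if_filipino_bigrams(word: str) -> Optional[str]:
--     if not word or len(word) < 2:
--         return None
--     w = word.lower()
--     for a, b in zip(w, w[1:]):
--         if a + b in FIL_BIGRAM_CLUES:
--             return 'FIL'
--     return None
-- ===== Notes on version B (the rewrite author's own statement) =====
-- stated objective: alternative
-- what changed: B makes a single left-to-right pass over adjacent character pairs of the lowercased word, testing each 2-char window against the clue set, instead of scanning the whole word once per clue with a substring search.
import Mathlib
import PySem

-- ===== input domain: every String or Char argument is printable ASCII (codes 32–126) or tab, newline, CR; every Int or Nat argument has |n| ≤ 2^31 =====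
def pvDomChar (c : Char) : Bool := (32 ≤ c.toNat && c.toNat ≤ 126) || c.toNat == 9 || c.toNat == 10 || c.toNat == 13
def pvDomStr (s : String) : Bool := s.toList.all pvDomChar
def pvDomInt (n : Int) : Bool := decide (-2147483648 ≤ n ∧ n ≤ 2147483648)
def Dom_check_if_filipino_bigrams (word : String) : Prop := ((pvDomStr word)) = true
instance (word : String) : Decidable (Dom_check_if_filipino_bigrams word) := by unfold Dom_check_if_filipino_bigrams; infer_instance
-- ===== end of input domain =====

-- B scans adjacent character pairs of the lowercased word once, testing each
-- 2-char window against the clue set, instead of one substring search per clue.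

-- ===== PORT A =====
-- FIL_BIGRAM_CLUES = {'ng', 'mg'}: a set literal, insertion order
def filBigramClues : List String := PySem.Set.ofList ["ng", "mg"]

-- the 'for bg in FIL_BIGRAM_CLUES' loop with early return
def filClueLoop (w : String) : List String → Option String
  | [] => none
  | bg :: rest => if PySem.Str.isIn bg w then some "FIL" else filClueLoop w rest

def check_if_filipino_bigrams (word : String) : Option String :=
  if word == "" || PySem.Str.len word < 2 then none
  else
    let w := PySem.Str.lower word
    filClueLoop w filBigramClues

-- ===== PORT B =====
-- the 'for a, b in zip(w, w[1:])' loop with early return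
def filPairLoop : List (Char × Char) → Option String
  | [] => none
  | (a, b) :: rest =>
    if PySem.Set.contains filBigramClues (String.ofList [a, b]) then some "FIL"
    else filPairLoop rest

def check_if_filipino_bigrams_alt (word : String) : Option String :=
  if word == "" || PySem.Str.len word < 2 then none
  else
    let w := PySem.Chars.lower word.toList
    filPairLoop (w.zip (w.drop 1))

-- ===== PRECONDITION & SPEC =====
def Spec_check_if_filipino_bigrams (word : String) (out : Option String) : Prop := out = check_if_filipino_bigrams_alt word
instance (word : String) (out : Option String) : Decidable (Spec_check_if_filipino_bigrams word out) := by unfold Spec_check_if_filipino_bigrams; infer_instance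

-- ===== CLAIM (what is proved, stated in full; the proofs are below) =====
def Claim_equal_check_if_filipino_bigrams : Prop := ∀ (word : String), Dom_check_if_filipino_bigrams word → Spec_check_if_filipino_bigrams word (check_if_filipino_bigrams word)

-- ===== LEMMAS AND PROOFS =====

-- B's pair scan finds 'FIL' exactly when 'ng' or 'mg' occurs as an infix.
lemma filPairLoop_eq (w : List Char) :
    filPairLoop (w.zip (w.drop 1)) =
      (if (['n','g'] <:+: w ∨ ['m','g'] <:+: w) then some "FIL" else none) := by
  induction w with
  | nil => simp [filPairLoop]
  | cons c t ih =>
    cases t with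
    | nil =>
      simp [filPairLoop, List.infix_cons_iff, List.cons_prefix_cons]
    | cons c2 t2 =>
      have hstep : (c :: c2 :: t2).zip ((c :: c2 :: t2).drop 1)
          = (c, c2) :: ((c2 :: t2).zip ((c2 :: t2).drop 1)) := by
        simp [List.zip]
      rw [hstep]
      by_cases h : (c = 'n' ∧ c2 = 'g') ∨ (c = 'm' ∧ c2 = 'g')
      · have hpre : (['n','g'] <+: c :: c2 :: t2) ∨ (['m','g'] <+: c :: c2 :: t2) := by
          rcases h with ⟨h1, h2⟩ | ⟨h1, h2⟩
          · exact Or.inl (by simp [h1, h2, List.cons_prefix_cons])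
          · exact Or.inr (by simp [h1, h2, List.cons_prefix_cons])
        have hin : (['n','g'] <:+: c :: c2 :: t2) ∨ (['m','g'] <:+: c :: c2 :: t2) := by
          rcases hpre with hp | hp
          · exact Or.inl hp.isInfix
          · exact Or.inr hp.isInfix
        have hmem : PySem.Set.contains filBigramClues (String.ofList [c, c2]) = true := by
          rcases h with ⟨h1, h2⟩ | ⟨h1, h2⟩ <;> subst h1 <;> subst h2 <;> decide
        simp only [filPairLoop, hmem, if_true]
        rw [if_pos hin]
      · have hmem : PySem.Set.contains filBigramClues (String.ofList [c, c2]) = false := by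
          by_contra hc
          have hc' : PySem.Set.contains filBigramClues (String.ofList [c, c2]) = true := by
            revert hc; cases PySem.Set.contains filBigramClues (String.ofList [c, c2]) <;> simp
          have : String.ofList [c, c2] ∈ filBigramClues := (PySem.Set.contains_iff _ _).mp hc'
          have : String.ofList [c, c2] = "ng" ∨ String.ofList [c, c2] = "mg" := by
            simpa [filBigramClues, PySem.Set.ofList] using this
          rcases this with he | he
          · have hl : [c, c2] = ['n', 'g'] := by
              simpa using congrArg String.toList he
            exact h (Or.inl ⟨by injection hl, by injection hl with _ h2; injection h2⟩)
          · have hl : [c, c2] = ['m', 'g'] := by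
              simpa using congrArg String.toList he
            exact h (Or.inr ⟨by injection hl, by injection hl with _ h2; injection h2⟩)
        have hnpre : ¬ (['n','g'] <+: c :: c2 :: t2) ∧ ¬ (['m','g'] <+: c :: c2 :: t2) := by
          constructor <;> intro hp
          · rcases (by simpa [List.cons_prefix_cons] using hp : 'n' = c ∧ 'g' = c2) with ⟨e1, e2⟩
            exact h (Or.inl ⟨e1.symm, e2.symm⟩)
          · rcases (by simpa [List.cons_prefix_cons] using hp : 'm' = c ∧ 'g' = c2) with ⟨e1, e2⟩
            exact h (Or.inr ⟨e1.symm, e2.symm⟩)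
        simp only [filPairLoop, hmem, Bool.false_eq_true, if_false]
        rw [ih]
        congr 1
        apply propext
        simp only [List.infix_cons_iff]
        tauto

-- A's clue loop finds 'FIL' exactly when 'ng' or 'mg' occurs as an infix.
lemma filClueLoop_eq (w : String) :
    filClueLoop w filBigramClues =
      (if (['n','g'] <:+: w.toList ∨ ['m','g'] <:+: w.toList) then some "FIL" else none) := by
  have hclues : filBigramClues = ["ng", "mg"] := by decide
  rw [hclues]
  simp only [filClueLoop]
  by_cases hn1 : ['n','g'] <:+: w.toList
  · have h1 : PySem.Chars.isIn ['n','g'] w.toList = true :=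
      (PySem.Chars.isIn_iff_infix _ _).mpr hn1
    simp [h1, hn1]
  · have h1 : PySem.Chars.isIn ['n','g'] w.toList = false :=
      (PySem.Chars.isIn_eq_false_iff _ _).mpr hn1
    by_cases hn2 : ['m','g'] <:+: w.toList
    · have h2 : PySem.Chars.isIn ['m','g'] w.toList = true :=
        (PySem.Chars.isIn_iff_infix _ _).mpr hn2
      simp [h1, h2, hn2]
    · have h2 : PySem.Chars.isIn ['m','g'] w.toList = false :=
        (PySem.Chars.isIn_eq_false_iff _ _).mpr hn2
      simp [h1, h2, hn1, hn2]

-- ===== VERDICT (by name: the statement is the Claim_ definition above) =====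
theorem check_if_filipino_bigrams_spec : Claim_equal_check_if_filipino_bigrams := by
  intro word _
  unfold Spec_check_if_filipino_bigrams check_if_filipino_bigrams check_if_filipino_bigrams_alt
  by_cases hg : (word == "" || decide (PySem.Str.len word < 2)) = true
  · rw [if_pos hg, if_pos hg]
  · rw [if_neg hg, if_neg hg, filClueLoop_eq, filPairLoop_eq]
    simp [PySem.Str.toList_lower]
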